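-- pv_equiv track=rewrite | github.com/bofeiw/Tetris-Python | AI_player.py | evaluate_hidden_squares
-- ===== SOURCE A (Python) =====
-- def evaluate_hidden_squares(squares):
--     '''find the number of non-squares under squares'''
--     hidden_squares = 0
--     for colomn in squares:
--         found_first_sq = False
--         for sq in colomn:
--             # find first square
--             if not found_first_sq:
--                 if sq != 'none':
--                     found_first_sq = True
--                 else:
--                     continue
--             # find hidden squares
--             if sq == 'none':
--                 hidden_squares += 1
--     return hidden_squares
-- ===== SOURCE B (Python) =====
-- def evaluate_hidden_squares(squares):
--     '''find the number of non-squares under squares'''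
--     def leading_nones(column):
--         n = 0
--         for sq in column:
--             if sq != 'none':
--                 break
--             n += 1
--         return n
--     return sum(column.count('none') - leading_nones(column) for column in squares)
-- ===== Notes on version B (the rewrite author's own statement) =====
-- stated objective: simpler
-- what changed: Replaces the boolean-flag single loop by a two-phase per-column computation: total 'none' count minus the leading run of 'none', summed over columns.
import Mathlib
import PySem

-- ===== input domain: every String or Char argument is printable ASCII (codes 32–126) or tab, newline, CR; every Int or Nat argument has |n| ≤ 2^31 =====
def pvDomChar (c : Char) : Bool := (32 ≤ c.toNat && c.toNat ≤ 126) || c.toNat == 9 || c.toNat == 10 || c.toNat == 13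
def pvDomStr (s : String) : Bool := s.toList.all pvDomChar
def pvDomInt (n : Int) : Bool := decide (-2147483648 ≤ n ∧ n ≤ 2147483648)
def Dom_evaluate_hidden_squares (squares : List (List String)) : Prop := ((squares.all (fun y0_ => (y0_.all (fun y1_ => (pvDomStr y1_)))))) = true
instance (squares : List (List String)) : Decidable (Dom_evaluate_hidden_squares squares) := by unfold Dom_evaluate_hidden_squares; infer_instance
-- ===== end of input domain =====

-- B replaces A's boolean-flag loop by per-column arithmetic (total 'none' count minus the leading 'none' run), for simplicity; not faster.
-- ===== PORT A =====
-- flag loop: state (found_first_sq, hidden_squares); branches in A's order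
-- inner loop body of A: state (found_first_sq, hidden_squares), branches in A's order
def innerStep (st : Bool × Int) (sq : String) : Bool × Int :=
  let st :=
    if !st.1 then
      (if sq != "none" then (true, st.2) else st)   -- 'continue' keeps state unchanged
    else st
  if st.1 then (if sq == "none" then (st.1, st.2 + 1) else st) else st

def evaluate_hidden_squares (squares : List (List String)) : Int :=
  squares.foldl (fun hidden colomn => (colomn.foldl innerStep (false, hidden)).2) 0

-- ===== PORT B =====
-- B: per column, total 'none' count minus the leading run of 'none'
def leadingNones (column : List String) : Int :=
  match column with
  | [] => 0
  | sq :: rest => if sq != "none" then 0 else leadingNones rest + 1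

def evaluate_hidden_squares_alt (squares : List (List String)) : Int :=
  (squares.map (fun column => (PySem.List.count column "none" : Int) - leadingNones column)).sum

-- ===== PRECONDITION & SPEC =====
def Spec_evaluate_hidden_squares (squares : List (List String)) (out : Int) : Prop := out = evaluate_hidden_squares_alt squares
instance (squares : List (List String)) (out : Int) : Decidable (Spec_evaluate_hidden_squares squares out) := by unfold Spec_evaluate_hidden_squares; infer_instance

-- ===== CLAIM (what is proved, stated in full; the proofs are below) =====
def Claim_equal_evaluate_hidden_squares : Prop := ∀ (squares : List (List String)), Dom_evaluate_hidden_squares squares → Spec_evaluate_hidden_squares squares (evaluate_hidden_squares squares)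

-- ===== LEMMAS AND PROOFS =====

-- inner fold after the first square is found just counts 'none'
lemma inner_true (col : List String) (h : Int) :
    col.foldl innerStep (true, h) = (true, h + (PySem.List.count col "none" : Int)) := by
  induction col generalizing h with
  | nil => simp [PySem.List.count]
  | cons x xs ih =>
    rw [List.foldl_cons]
    by_cases hx : x = "none"
    · have : innerStep (true, h) x = (true, h + 1) := by simp [innerStep, hx]
      rw [this, ih]
      simp [PySem.List.count, hx]
      ring
    · have : innerStep (true, h) x = (true, h) := by simp [innerStep, hx]
      rw [this, ih]
      simp [PySem.List.count, hx]

-- inner fold from the unfound state: count minus leading run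
lemma inner_false (col : List String) (h : Int) :
    (col.foldl innerStep (false, h)).2
      = h + (PySem.List.count col "none" : Int) - leadingNones col := by
  induction col generalizing h with
  | nil => simp [PySem.List.count, leadingNones]
  | cons x xs ih =>
    rw [List.foldl_cons]
    by_cases hx : x = "none"
    · have : innerStep (false, h) x = (false, h) := by simp [innerStep, hx]
      rw [this, ih]
      simp [PySem.List.count, hx, leadingNones]
      ring
    · have : innerStep (false, h) x = (true, h) := by simp [innerStep, hx]
      rw [this, inner_true]
      simp [PySem.List.count, hx, leadingNones]

-- outer fold accumulates the per-column contributions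
lemma outer_eq (squares : List (List String)) (h : Int) :
    squares.foldl (fun hidden colomn => (colomn.foldl innerStep (false, hidden)).2) h
      = h + (squares.map (fun column =>
          (PySem.List.count column "none" : Int) - leadingNones column)).sum := by
  induction squares generalizing h with
  | nil => simp
  | cons c cs ih =>
    rw [List.foldl_cons, inner_false, ih]
    simp; ring

-- ===== VERDICT (by name: the statement is the Claim_ definition above) =====
theorem evaluate_hidden_squares_spec : Claim_equal_evaluate_hidden_squares := by
  intro squares _
  unfold Spec_evaluate_hidden_squares evaluate_hidden_squares evaluate_hidden_squares_alt
  rw [outer_eq]; ring
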